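-- pv_equiv track=rewrite | github.com/shafiazam45/kasparro-ai-agentic-content-generation-system-mdshafi-azam | agents/logic_block_agent.py | compare_benefits_block
-- ===== SOURCE A (Python) =====
-- from typing import Dict, List, Any
--
-- def compare_benefits_block(prod_a: Dict[str, Any], prod_b: Dict[str, Any]) -> Dict[str, List[str]]:
--     a_ben = set([b.lower() for b in prod_a.get("benefits", [])])
--     b_ben = set([b.lower() for b in prod_b.get("benefits", [])])
--     return {
--         "a_only": sorted([b.title() for b in (a_ben - b_ben)]),
--         "b_only": sorted([b.title() for b in (b_ben - a_ben)]),
--         "common": sorted([b.title() for b in (a_ben & b_ben)]),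
--     }
-- ===== SOURCE B (Python) =====
-- from typing import Dict, List, Any
--
-- def compare_benefits_block(prod_a: Dict[str, Any], prod_b: Dict[str, Any]) -> Dict[str, List[str]]:
--     # One flag dictionary instead of two sets and set algebra: bit 1 = seen in A, bit 2 = seen in B.
--     flags = {}
--     for ben in prod_a.get("benefits", []):
--         k = ben.lower()
--         flags[k] = flags.get(k, 0) | 1
--     for ben in prod_b.get("benefits", []):
--         k = ben.lower()
--         flags[k] = flags.get(k, 0) | 2
--     out = {"a_only": [], "b_only": [], "common": []}
--     for k, f in flags.items():
--         bucket = "common" if f == 3 else ("a_only" if f == 1 else "b_only")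
--         out[bucket].append(k.title())
--     for bucket in out:
--         out[bucket].sort()
--     return out
-- ===== Notes on version B (the rewrite author's own statement) =====
-- stated objective: alternative
-- what changed: Replaces A's two sets and three set-algebra expressions by a single bitmask dictionary (bit 1 = seen in product A, bit 2 = seen in product B) built in one pass over each benefit list, then one pass over the dictionary items distributes each title-cased benefit into the bucket named by its flag value; buckets are sorted at the end.
import Mathlib
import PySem

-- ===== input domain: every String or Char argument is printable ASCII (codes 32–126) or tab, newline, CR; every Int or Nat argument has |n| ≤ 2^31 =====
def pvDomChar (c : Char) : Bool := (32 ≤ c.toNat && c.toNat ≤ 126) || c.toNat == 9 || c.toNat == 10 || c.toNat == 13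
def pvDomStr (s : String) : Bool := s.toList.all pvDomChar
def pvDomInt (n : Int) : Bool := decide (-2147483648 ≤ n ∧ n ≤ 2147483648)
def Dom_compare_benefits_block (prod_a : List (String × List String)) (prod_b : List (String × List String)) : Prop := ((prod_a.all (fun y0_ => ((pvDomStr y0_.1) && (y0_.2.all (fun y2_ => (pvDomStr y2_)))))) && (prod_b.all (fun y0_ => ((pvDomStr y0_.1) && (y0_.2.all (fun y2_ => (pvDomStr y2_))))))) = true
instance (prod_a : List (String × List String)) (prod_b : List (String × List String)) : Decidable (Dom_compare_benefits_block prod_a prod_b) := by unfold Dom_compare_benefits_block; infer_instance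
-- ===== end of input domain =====

-- B replaces A's two sets and three set-algebra expressions by one bitmask dictionary
-- (bit 1 = in A, bit 2 = in B) and a classifying pass over its items (alternative
-- decomposition; same return value, no speed claim).


-- ===== PORT A =====
-- str.title(), hand-ported over List Char (exact on ASCII: a letter after a non-letter is
-- uppercased, any other letter lowercased, non-letters copied); used by both ports.
def pvTitleChars : List Char → Bool → List Char
  | [], _ => []
  | c :: rest, prev =>
    if PySem.Chars.isalpha c then
      (if prev then PySem.Chars.lowerChar c else PySem.Chars.upperChar c) :: pvTitleChars rest true
    else
      c :: pvTitleChars rest false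

def pvTitle (s : String) : String := String.ofList (pvTitleChars s.toList false)

def compare_benefits_block (prod_a : List (String × List String)) (prod_b : List (String × List String)) : List (String × List String) :=
  let a_ben : PySem.Set String := PySem.Set.ofList ((PySem.Dict.getD (PySem.Dict.mk prod_a) "benefits" []).map PySem.Str.lower)
  let b_ben : PySem.Set String := PySem.Set.ofList ((PySem.Dict.getD (PySem.Dict.mk prod_b) "benefits" []).map PySem.Str.lower)
  [("a_only", PySem.List.sorted ((PySem.Set.diff a_ben b_ben).map pvTitle) (fun x => x) false),
   ("b_only", PySem.List.sorted ((PySem.Set.diff b_ben a_ben).map pvTitle) (fun x => x) false),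
   ("common", PySem.List.sorted ((PySem.Set.inter a_ben b_ben).map pvTitle) (fun x => x) false)]

-- ===== PORT B =====
-- the body of B's classifying loop over flags.items(): flag 3 -> common, 1 -> a_only, else -> b_only
def pvClassStep (acc : List String × List String × List String) (p : String × Int) :
    List String × List String × List String :=
  if p.2 == 3 then (acc.1, acc.2.1, acc.2.2 ++ [pvTitle p.1])
  else if p.2 == 1 then (acc.1 ++ [pvTitle p.1], acc.2.1, acc.2.2)
  else (acc.1, acc.2.1 ++ [pvTitle p.1], acc.2.2)

def compare_benefits_block_alt (prod_a : List (String × List String)) (prod_b : List (String × List String)) : List (String × List String) :=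
  -- flags[k] = flags.get(k, 0) | 1  over prod_a's benefits, then | 2 over prod_b's
  let flags1 : PySem.Dict String Int :=
    (PySem.Dict.getD (PySem.Dict.mk prod_a) "benefits" []).foldl
      (fun d ben => d.insert (PySem.Str.lower ben) (PySem.Int.bor (d.getD (PySem.Str.lower ben) 0) 1))
      PySem.Dict.empty
  let flags : PySem.Dict String Int :=
    (PySem.Dict.getD (PySem.Dict.mk prod_b) "benefits" []).foldl
      (fun d ben => d.insert (PySem.Str.lower ben) (PySem.Int.bor (d.getD (PySem.Str.lower ben) 0) 2))
      flags1
  -- out["a_only"] / out["b_only"] / out["common"] kept as the three components of a triple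
  let acc := flags.items.foldl pvClassStep ([], [], [])
  [("a_only", PySem.List.sorted acc.1 (fun x => x) false),
   ("b_only", PySem.List.sorted acc.2.1 (fun x => x) false),
   ("common", PySem.List.sorted acc.2.2 (fun x => x) false)]

-- ===== PRECONDITION & SPEC =====
def Spec_compare_benefits_block (prod_a : List (String × List String)) (prod_b : List (String × List String)) (out : List (String × List String)) : Prop := out = compare_benefits_block_alt prod_a prod_b
instance (prod_a : List (String × List String)) (prod_b : List (String × List String)) (out : List (String × List String)) : Decidable (Spec_compare_benefits_block prod_a prod_b out) := by unfold Spec_compare_benefits_block; infer_instance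

-- ===== CLAIM (what is proved, stated in full; the proofs are below) =====
def Claim_equal_compare_benefits_block : Prop := ∀ (prod_a : List (String × List String)) (prod_b : List (String × List String)), Dom_compare_benefits_block prod_a prod_b → Spec_compare_benefits_block prod_a prod_b (compare_benefits_block prod_a prod_b)

-- ===== LEMMAS AND PROOFS =====

-- the flag value of a key seen in A iff a, in B iff b
def pvFlag (a b : Bool) : Int := (if a then 1 else 0) + (if b then 2 else 0)

theorem pv_bor1 (a b : Bool) : PySem.Int.bor (pvFlag a b) 1 = pvFlag true b := by
  cases a <;> cases b <;> decide

theorem pv_bor2 (a b : Bool) : PySem.Int.bor (pvFlag a b) 2 = pvFlag a true := by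
  cases a <;> cases b <;> decide

-- pass 1: flags.get(k,0)|1 sets the A-bit of every lowered benefit of the list
theorem pv_pass1_getD (l : List String) (d : PySem.Dict String Int) (P Q : String → Bool)
    (hd : ∀ x, d.getD x 0 = pvFlag (P x) (Q x)) (x : String) :
    (l.foldl (fun d ben => d.insert (PySem.Str.lower ben) (PySem.Int.bor (d.getD (PySem.Str.lower ben) 0) 1)) d).getD x 0
      = pvFlag (P x || l.any (fun ben => PySem.Str.lower ben == x)) (Q x) := by
  induction l generalizing d P with
  | nil => simp [hd]
  | cons h t ih =>
      rw [List.foldl_cons]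
      rw [ih _ (fun y => P y || (PySem.Str.lower h == y)) ?_]
      · simp [Bool.or_assoc]
      · intro y
        rw [PySem.Dict.getD_insert]
        split
        · next hy => subst hy; simp [hd, pv_bor1]
        · next hy =>
            have hf : (PySem.Str.lower h == y) = false :=
              beq_eq_false_iff_ne.mpr (Ne.symm hy)
            simp [hd, hf]

-- pass 2: flags.get(k,0)|2 sets the B-bit
theorem pv_pass2_getD (l : List String) (d : PySem.Dict String Int) (P Q : String → Bool)
    (hd : ∀ x, d.getD x 0 = pvFlag (P x) (Q x)) (x : String) :
    (l.foldl (fun d ben => d.insert (PySem.Str.lower ben) (PySem.Int.bor (d.getD (PySem.Str.lower ben) 0) 2)) d).getD x 0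
      = pvFlag (P x) (Q x || l.any (fun ben => PySem.Str.lower ben == x)) := by
  induction l generalizing d Q with
  | nil => simp [hd]
  | cons h t ih =>
      rw [List.foldl_cons]
      rw [ih _ (fun y => Q y || (PySem.Str.lower h == y)) ?_]
      · simp [Bool.or_assoc]
      · intro y
        rw [PySem.Dict.getD_insert]
        split
        · next hy => subst hy; simp [hd, pv_bor2]
        · next hy =>
            have hf : (PySem.Str.lower h == y) = false :=
              beq_eq_false_iff_ne.mpr (Ne.symm hy)
            simp [hd, hf]

-- B's classifying fold splits into three filtered map-lists over the items
theorem pv_fold_split (u : List (String × Int)) (x y z : List String) :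
    u.foldl pvClassStep (x, y, z)
      = (x ++ ((u.filter (fun p => p.2 == 1)).map (fun p => pvTitle p.1)),
         y ++ ((u.filter (fun p => p.2 != 3 && p.2 != 1)).map (fun p => pvTitle p.1)),
         z ++ ((u.filter (fun p => p.2 == 3)).map (fun p => pvTitle p.1))) := by
  induction u generalizing x y z with
  | nil => simp
  | cons h t ih =>
      rw [List.foldl_cons]
      by_cases h3 : h.2 = 3
      · simp [pvClassStep, h3, ih]
      · by_cases h1 : h.2 = 1 <;> simp [pvClassStep, h3, h1, ih]

theorem pv_contains_true {s : PySem.Set String} {x : String} (h : x ∈ s) :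
    PySem.Set.contains s x = true := (PySem.Set.contains_iff s x).mpr h

-- the union of two nodup sets is the first followed by the new elements of the second
theorem pv_union_eq (a b : PySem.Set String) (hb : b.Nodup) :
    PySem.Set.union a b = a ++ b.filter (fun y => !PySem.Set.contains a y) := by
  have h : PySem.Set.union a b = PySem.Set.update a b := rfl
  rw [h, PySem.Set.update_eq_append_filter, PySem.Set.ofList_eq_self_of_nodup b hb]

theorem pv_filters (a b : PySem.Set String) (hb : b.Nodup) :
    ((PySem.Set.union a b).filter (fun e => PySem.Set.contains a e && !PySem.Set.contains b e)
       = PySem.Set.diff a b)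
    ∧ ((PySem.Set.union a b).filter (fun e => !PySem.Set.contains a e)
       = PySem.Set.diff b a)
    ∧ ((PySem.Set.union a b).filter (fun e => PySem.Set.contains a e && PySem.Set.contains b e)
       = PySem.Set.inter a b) := by
  rw [pv_union_eq a b hb]
  refine ⟨?_, ?_, ?_⟩
  · rw [List.filter_append]
    have h1 : a.filter (fun e => PySem.Set.contains a e && !PySem.Set.contains b e)
        = a.filter (fun e => !PySem.Set.contains b e) :=
      List.filter_congr (fun x hx => by rw [pv_contains_true hx, Bool.true_and])
    have h2 : (b.filter (fun y => !PySem.Set.contains a y)).filter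
        (fun e => PySem.Set.contains a e && !PySem.Set.contains b e) = [] := by
      rw [List.filter_eq_nil_iff]
      intro x hx
      obtain ⟨hxb, -⟩ := List.mem_filter.mp hx
      rw [pv_contains_true hxb, Bool.not_true, Bool.and_false]
      exact Bool.false_ne_true
    rw [h1, h2, List.append_nil]; rfl
  · rw [List.filter_append]
    have h1 : a.filter (fun e => !PySem.Set.contains a e) = [] := by
      rw [List.filter_eq_nil_iff]
      intro x hx
      rw [pv_contains_true hx, Bool.not_true]
      exact Bool.false_ne_true
    have h2 : (b.filter (fun y => !PySem.Set.contains a y)).filter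
        (fun e => !PySem.Set.contains a e)
        = b.filter (fun y => !PySem.Set.contains a y) := by
      rw [List.filter_filter]
      exact List.filter_congr (fun x _ => by cases PySem.Set.contains a x <;> rfl)
    rw [h1, h2, List.nil_append]; rfl
  · rw [List.filter_append]
    have h1 : a.filter (fun e => PySem.Set.contains a e && PySem.Set.contains b e)
        = a.filter (fun e => PySem.Set.contains b e) :=
      List.filter_congr (fun x hx => by rw [pv_contains_true hx, Bool.true_and])
    have h2 : (b.filter (fun y => !PySem.Set.contains a y)).filter
        (fun e => PySem.Set.contains a e && PySem.Set.contains b e) = [] := by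
      rw [List.filter_eq_nil_iff]
      intro x hx
      obtain ⟨-, hc⟩ := List.mem_filter.mp hx
      have : PySem.Set.contains a x = false := by
        cases hca : PySem.Set.contains a x
        · rfl
        · rw [hca] at hc; exact absurd hc (by decide)
      rw [this, Bool.false_and]
      exact Bool.false_ne_true
    rw [h1, h2, List.append_nil]; rfl

-- an 'any (lower ben == x)' test IS membership in the lowered set
theorem pv_any_eq_contains (l : List String) (x : String) :
    l.any (fun ben => PySem.Str.lower ben == x)
      = PySem.Set.contains (PySem.Set.ofList (l.map PySem.Str.lower)) x := by
  rw [Bool.eq_iff_iff, List.any_eq_true]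
  rw [show (PySem.Set.contains (PySem.Set.ofList (l.map PySem.Str.lower)) x = true)
        ↔ x ∈ PySem.Set.ofList (l.map PySem.Str.lower) from PySem.Set.contains_iff _ _]
  rw [PySem.Set.mem_ofList, List.mem_map]
  constructor
  · rintro ⟨b, hb, he⟩; exact ⟨b, hb, eq_of_beq he⟩
  · rintro ⟨b, hb, he⟩; exact ⟨b, hb, beq_iff_eq.mpr he⟩

-- flag-value tests in terms of the membership bits
theorem pv_flag_eq1 (a b : Bool) : (pvFlag a b == 1) = (a && !b) := by cases a <;> cases b <;> decide
theorem pv_flag_eq3 (a b : Bool) : (pvFlag a b == 3) = (a && b) := by cases a <;> cases b <;> decide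
theorem pv_flag_else (a b : Bool) : (pvFlag a b != 3 && pvFlag a b != 1) = !a := by cases a <;> cases b <;> decide

-- ===== VERDICT (by name: the statement is the Claim_ definition above) =====
theorem compare_benefits_block_spec : Claim_equal_compare_benefits_block := by
  intro prod_a prod_b _
  unfold Spec_compare_benefits_block
  simp only [compare_benefits_block, compare_benefits_block_alt]
  set A_list := PySem.Dict.getD (PySem.Dict.mk prod_a) "benefits" [] with hA
  set B_list := PySem.Dict.getD (PySem.Dict.mk prod_b) "benefits" [] with hB
  set aS : PySem.Set String := PySem.Set.ofList (A_list.map PySem.Str.lower) with haS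
  set bS : PySem.Set String := PySem.Set.ofList (B_list.map PySem.Str.lower) with hbS
  set flags1 : PySem.Dict String Int :=
    A_list.foldl
      (fun d ben => d.insert (PySem.Str.lower ben) (PySem.Int.bor (d.getD (PySem.Str.lower ben) 0) 1))
      PySem.Dict.empty with hflags1
  set flags : PySem.Dict String Int :=
    B_list.foldl
      (fun d ben => d.insert (PySem.Str.lower ben) (PySem.Int.bor (d.getD (PySem.Str.lower ben) 0) 2))
      flags1 with hflags
  -- lookups of the flag dict
  have hget : ∀ x, flags.getD x 0 = pvFlag (PySem.Set.contains aS x) (PySem.Set.contains bS x) := by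
    intro x
    have h1 : ∀ y, flags1.getD y 0
        = pvFlag (A_list.any (fun ben => PySem.Str.lower ben == y)) false := by
      intro y
      have := pv_pass1_getD A_list PySem.Dict.empty (fun _ => false) (fun _ => false)
        (fun z => by simp [PySem.Dict.getD_empty, pvFlag]) y
      simpa using this
    have h2 := pv_pass2_getD B_list flags1
      (fun y => A_list.any (fun ben => PySem.Str.lower ben == y)) (fun _ => false) h1 x
    rw [hflags, h2]
    simp [pv_any_eq_contains, haS, hbS]
  -- keys of the flag dict = the union set
  have hnd1 : flags1.keys.Nodup :=
    PySem.Dict.nodup_keys_foldl_insert_key A_list PySem.Str.lower _ _ PySem.Dict.nodup_keys_empty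
  have hnd : flags.keys.Nodup :=
    PySem.Dict.nodup_keys_foldl_insert_key B_list PySem.Str.lower _ _ hnd1
  have hk1 : flags1.keys = aS := by
    rw [hflags1, PySem.Dict.keys_foldl_insert_key, PySem.Dict.keys_empty]
    exact PySem.Set.update_nil_left _
  have hkeys : flags.keys = PySem.Set.union aS bS := by
    rw [hflags, PySem.Dict.keys_foldl_insert_key, hk1]
    have hu : PySem.Set.union aS bS = PySem.Set.update aS bS := rfl
    rw [hu, PySem.Set.update_eq_append_filter, PySem.Set.update_eq_append_filter, hbS,
      PySem.Set.ofList_ofList]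
  -- items of the flag dict
  have hitems : flags.items
      = (PySem.Set.union aS bS).map
          (fun k => (k, pvFlag (PySem.Set.contains aS k) (PySem.Set.contains bS k))) := by
    rw [PySem.Dict.items_eq_map_keys flags hnd 0, hkeys]
    exact List.map_congr_left (fun k _ => by rw [hget k])
  rw [pv_fold_split, hitems]
  simp only [List.nil_append, List.filter_map, Function.comp_def, pv_flag_eq1, pv_flag_eq3,
    pv_flag_else, List.map_map]
  obtain ⟨f1, f2, f3⟩ := pv_filters aS bS (PySem.Set.nodup_ofList _)
  rw [f1, f2, f3]
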